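-- pv_equiv track=rewrite | github.com/Suryaratnam27/leetcode-python-solutions | 2032.py | tot
-- ===== SOURCE A (Python) =====
-- def tot(num1,num2,num3):
--     num1=set(num1)
--     num2=set(num2)
--     num3=set(num3)
--     #initialise
--     s_char={}
--     a=[]
--     for i in num1:
--         s_char[i]=0
--     for i in num2:
--         s_char[i]=0
--     for i in num3:
--         s_char[i]=0
--     for i in num1:
--         s_char[i]+=1
--     for i in num2:
--         s_char[i]+=1
--     for i in num3:
--         s_char[i]+=1
--     for k,v in s_char.items():
--         if v>1:
--             a.append(k)
--     return a
-- ===== SOURCE B (Python) =====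
-- def tot(num1, num2, num3):
--     s1, s2, s3 = set(num1), set(num2), set(num3)
--     twice = (s1 & s2) | (s1 & s3) | (s2 & s3)
--     out = []
--     seen = set()
--     for x in (*s1, *s2, *s3):
--         if x in twice and x not in seen:
--             out.append(x)
--             seen.add(x)
--     return out
-- ===== Notes on version B (the rewrite author's own statement) =====
-- stated objective: idiomatic
-- what changed: Replaces the six per-element dict-counting passes with set algebra twice = (s1&s2)|(s1&s3)|(s2&s3) plus a single dedup/ordering pass over the chained sets.
import Mathlib
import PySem

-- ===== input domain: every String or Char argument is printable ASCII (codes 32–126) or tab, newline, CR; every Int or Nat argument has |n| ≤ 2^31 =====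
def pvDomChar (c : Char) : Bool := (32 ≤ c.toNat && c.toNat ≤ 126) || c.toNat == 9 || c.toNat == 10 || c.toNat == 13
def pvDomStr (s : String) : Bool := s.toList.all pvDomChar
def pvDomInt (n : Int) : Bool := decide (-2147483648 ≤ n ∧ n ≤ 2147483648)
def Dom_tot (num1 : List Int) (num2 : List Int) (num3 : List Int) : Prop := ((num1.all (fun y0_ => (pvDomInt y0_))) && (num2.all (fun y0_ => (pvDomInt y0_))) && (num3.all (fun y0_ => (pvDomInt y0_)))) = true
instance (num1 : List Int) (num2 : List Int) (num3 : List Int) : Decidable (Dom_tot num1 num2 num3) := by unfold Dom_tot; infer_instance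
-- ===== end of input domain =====

-- B replaces A's six dict-counting passes by set algebra ((s1&s2)|(s1&s3)|(s2&s3)) plus one
-- dedup pass over the chained sets for the output order (idiomatic; same asymptotic cost).

-- ===== PORT A =====
def tot (num1 : List Int) (num2 : List Int) (num3 : List Int) : List Int :=
  let s1 : PySem.Set Int := PySem.Set.ofList num1
  let s2 : PySem.Set Int := PySem.Set.ofList num2
  let s3 : PySem.Set Int := PySem.Set.ofList num3
  let d : PySem.Dict Int Int := PySem.Dict.empty
  let d := s1.foldl (fun d i => d.insert i 0) d
  let d := s2.foldl (fun d i => d.insert i 0) d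
  let d := s3.foldl (fun d i => d.insert i 0) d
  let d := s1.foldl (fun d i => d.modify i 0 (· + 1)) d
  let d := s2.foldl (fun d i => d.modify i 0 (· + 1)) d
  let d := s3.foldl (fun d i => d.modify i 0 (· + 1)) d
  d.items.foldl (fun a kv => if kv.2 > 1 then a ++ [kv.1] else a) []

-- ===== PORT B =====
def tot_alt (num1 : List Int) (num2 : List Int) (num3 : List Int) : List Int :=
  let s1 : PySem.Set Int := PySem.Set.ofList num1
  let s2 : PySem.Set Int := PySem.Set.ofList num2
  let s3 : PySem.Set Int := PySem.Set.ofList num3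
  let twice : PySem.Set Int :=
    PySem.Set.union (PySem.Set.union (PySem.Set.inter s1 s2) (PySem.Set.inter s1 s3)) (PySem.Set.inter s2 s3)
  let st := (s1 ++ s2 ++ s3).foldl
    (fun (st : List Int × PySem.Set Int) x =>
      if PySem.Set.contains twice x && !(PySem.Set.contains st.2 x) then
        (st.1 ++ [x], PySem.Set.add st.2 x)
      else st)
    ([], PySem.Set.empty)
  st.1

-- ===== PRECONDITION & SPEC =====
def Spec_tot (num1 : List Int) (num2 : List Int) (num3 : List Int) (out : List Int) : Prop := out = tot_alt num1 num2 num3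
instance (num1 : List Int) (num2 : List Int) (num3 : List Int) (out : List Int) : Decidable (Spec_tot num1 num2 num3 out) := by unfold Spec_tot; infer_instance

-- ===== CLAIM (what is proved, stated in full; the proofs are below) =====
def Claim_equal_tot : Prop := ∀ (num1 : List Int) (num2 : List Int) (num3 : List Int), Dom_tot num1 num2 num3 → Spec_tot num1 num2 num3 (tot num1 num2 num3)

-- ===== LEMMAS AND PROOFS =====

-- "filter the deduplicated list": seen grows at every fresh element (A's dict-key discipline)
def pvDfilter (p : Int → Bool) (seen : List Int) : List Int → List Int
  | [] => []
  | x :: l =>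
    if x ∈ seen then pvDfilter p seen l
    else (if p x then [x] else []) ++ pvDfilter p (seen ++ [x]) l

-- B's loop body as a recursion: seen grows only at appended elements
def pvFD (p : Int → Bool) (seen : PySem.Set Int) : List Int → List Int
  | [] => []
  | x :: l =>
    if p x && !(PySem.Set.contains seen x) then x :: pvFD p (PySem.Set.add seen x) l
    else pvFD p seen l

theorem pv_add_of_mem {s : PySem.Set Int} {x : Int} (h : x ∈ s) : PySem.Set.add s x = s := by
  simp [PySem.Set.add, h]

theorem pv_add_of_not_mem {s : PySem.Set Int} {x : Int} (h : ¬ x ∈ s) :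
    PySem.Set.add s x = s ++ [x] := by
  simp [PySem.Set.add, h]

theorem pv_filter_update (p : Int → Bool) :
    ∀ (l seen : List Int),
      (PySem.Set.update seen l).filter p = seen.filter p ++ pvDfilter p seen l
  | [], seen => by simp [PySem.Set.update, pvDfilter]
  | x :: l, seen => by
    show (PySem.Set.update (PySem.Set.add seen x) l).filter p = _
    by_cases hx : x ∈ seen
    · rw [pv_add_of_mem hx, pv_filter_update p l seen]
      simp [pvDfilter, hx]
    · rw [pv_add_of_not_mem hx, pv_filter_update p l (seen ++ [x])]
      simp only [pvDfilter, hx, List.filter_append, List.append_assoc]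
      cases hpx : p x <;> simp [List.filter, hpx]

theorem pv_bloop (p : Int → Bool) :
    ∀ (l : List Int) (out : List Int) (seen : PySem.Set Int),
      (l.foldl
        (fun (st : List Int × PySem.Set Int) x =>
          if p x && !(PySem.Set.contains st.2 x) then (st.1 ++ [x], PySem.Set.add st.2 x) else st)
        (out, seen)).1 = out ++ pvFD p seen l
  | [], out, seen => by simp [pvFD]
  | x :: l, out, seen => by
    simp only [List.foldl_cons]
    rw [pvFD]
    by_cases hc : (p x && !(PySem.Set.contains seen x)) = true
    · rw [if_pos hc, if_pos hc, pv_bloop p l (out ++ [x]) (PySem.Set.add seen x)]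
      simp
    · rw [if_neg hc, if_neg hc, pv_bloop p l out seen]

theorem pv_fd_eq_dfilter (p : Int → Bool) :
    ∀ (l : List Int) (seen1 seen2 : List Int),
      (∀ x, p x = true → (x ∈ seen1 ↔ x ∈ seen2)) →
      pvFD p seen1 l = pvDfilter p seen2 l
  | [], _, _, _ => rfl
  | x :: l, seen1, seen2, h => by
    by_cases hp : p x = true
    · by_cases h2 : x ∈ seen2
      · have h1 : x ∈ seen1 := (h x hp).2 h2
        have hc : PySem.Set.contains seen1 x = true := (PySem.Set.contains_iff _ _).2 h1
        simp only [pvFD, hc, Bool.not_true, Bool.and_false, pvDfilter, h2, if_pos]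
        exact pv_fd_eq_dfilter p l seen1 seen2 h
      · have h1 : ¬ x ∈ seen1 := fun hx => h2 ((h x hp).1 hx)
        have hc : PySem.Set.contains seen1 x = false := by
          by_contra hcc
          exact h1 ((PySem.Set.contains_iff _ _).1 (by revert hcc; cases PySem.Set.contains seen1 x <;> simp))
        simp only [pvFD, hc, Bool.not_false, Bool.and_true, if_pos, pvDfilter, h2, hp]
        rw [pv_add_of_not_mem h1]
        have : pvFD p (seen1 ++ [x]) l = pvDfilter p (seen2 ++ [x]) l := by
          apply pv_fd_eq_dfilter
          intro y hy
          simp only [List.mem_append, List.mem_singleton]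
          exact or_congr (h y hy) Iff.rfl
        simp [this]
    · have hp' : p x = false := by revert hp; cases p x <;> simp
      by_cases h2 : x ∈ seen2
      · simp only [pvFD, hp', Bool.false_and, pvDfilter, h2, if_pos]
        exact pv_fd_eq_dfilter p l seen1 seen2 h
      · simp only [pvFD, hp', Bool.false_and, pvDfilter, h2, if_false]
        apply pv_fd_eq_dfilter
        intro y hy
        have hyx : y ≠ x := fun e => by rw [e] at hy; rw [hp'] at hy; exact Bool.false_ne_true hy
        simp only [List.mem_append, List.mem_singleton]
        constructor
        · intro hs; exact Or.inl ((h y hy).1 hs)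
        · rintro (hs | rfl)
          · exact (h y hy).2 hs
          · exact absurd rfl hyx

-- update with an already-deduplicated list updates with the original list
theorem pv_update_update (s : PySem.Set Int) :
    ∀ (l : List Int) (t : PySem.Set Int),
      PySem.Set.update s (PySem.Set.update t l) = PySem.Set.update (PySem.Set.update s t) l
  | [], t => rfl
  | x :: l, t => by
    show PySem.Set.update s (PySem.Set.update (PySem.Set.add t x) l) = _
    rw [pv_update_update s l (PySem.Set.add t x)]
    have e : PySem.Set.update s (PySem.Set.add t x) = PySem.Set.add (PySem.Set.update s t) x := by
      by_cases hx : x ∈ t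
      · rw [pv_add_of_mem hx, pv_add_of_mem (by
          exact (PySem.Set.mem_update s t x).2 (Or.inr hx))]
      · rw [pv_add_of_not_mem hx]
        show List.foldl PySem.Set.add s (t ++ [x]) = _
        rw [List.foldl_append]
        rfl
    rw [e]
    rfl

theorem pv_update_ofList (s : PySem.Set Int) (l : List Int) :
    PySem.Set.update s (PySem.Set.ofList l) = PySem.Set.update s l := by
  rw [← PySem.Set.update_nil_left, pv_update_update]
  rfl

theorem pv_update_of_subset :
    ∀ (l : List Int) (s : PySem.Set Int), (∀ x ∈ l, x ∈ s) → PySem.Set.update s l = s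
  | [], _, _ => rfl
  | x :: l, s, h => by
    show PySem.Set.update (PySem.Set.add s x) l = s
    rw [pv_add_of_mem (h x (List.mem_cons_self))]
    exact pv_update_of_subset l s (fun y hy => h y (List.mem_cons_of_mem _ hy))

theorem pv_getD_insert_zero :
    ∀ (l : List Int) (d : PySem.Dict Int Int), (∀ k, d.getD k 0 = 0) →
      ∀ k, (l.foldl (fun d i => d.insert i 0) d).getD k 0 = 0
  | [], _, h, k => h k
  | x :: l, d, h, k => by
    simp only [List.foldl_cons]
    refine pv_getD_insert_zero l (d.insert x 0) (fun k' => ?_) k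
    rw [PySem.Dict.getD_insert]
    split <;> [rfl; exact h k']

theorem pv_count_ofList (l : List Int) (k : Int) :
    (List.count k (PySem.Set.ofList l) : Int) = if k ∈ l then 1 else 0 := by
  by_cases h : k ∈ l
  · rw [if_pos h]
    have := List.count_eq_one_of_mem (PySem.Set.nodup_ofList l) ((PySem.Set.mem_ofList l k).2 h)
    rw [this]; rfl
  · rw [if_neg h, List.count_eq_zero_of_not_mem (fun hc => h ((PySem.Set.mem_ofList l k).1 hc))]
    rfl

theorem pv_upd_app (s : PySem.Set Int) (u v : List Int) :
    PySem.Set.update s (u ++ v) = PySem.Set.update (PySem.Set.update s u) v := List.foldl_append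

theorem pv_update_chain (a b c : List Int) :
    PySem.Set.update (PySem.Set.update (PySem.Set.update [] (PySem.Set.ofList a)) (PySem.Set.ofList b)) (PySem.Set.ofList c)
      = PySem.Set.ofList (a ++ b ++ c) := by
  rw [PySem.Set.update_nil_left, PySem.Set.ofList_ofList, pv_update_ofList, pv_update_ofList,
    ← PySem.Set.update_nil_left (a ++ b ++ c), pv_upd_app, pv_upd_app, PySem.Set.update_nil_left]

theorem pv_ofList_chain (a b c : List Int) :
    PySem.Set.ofList (PySem.Set.ofList a ++ PySem.Set.ofList b ++ PySem.Set.ofList c)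
      = PySem.Set.ofList (a ++ b ++ c) := by
  rw [← PySem.Set.update_nil_left (PySem.Set.ofList a ++ PySem.Set.ofList b ++ PySem.Set.ofList c),
    pv_upd_app, pv_upd_app, pv_update_chain]

-- A's intermediate dicts, named for the proof (definitionally the lets of `tot`)
def pvD3 (num1 num2 num3 : List Int) : PySem.Dict Int Int :=
  ((PySem.Set.ofList num3).foldl (fun d i => d.insert i 0)
    ((PySem.Set.ofList num2).foldl (fun d i => d.insert i 0)
      ((PySem.Set.ofList num1).foldl (fun d i => d.insert i 0) PySem.Dict.empty)))

def pvD6 (num1 num2 num3 : List Int) : PySem.Dict Int Int :=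
  ((PySem.Set.ofList num3).foldl (fun d i => d.modify i 0 (· + 1))
    ((PySem.Set.ofList num2).foldl (fun d i => d.modify i 0 (· + 1))
      ((PySem.Set.ofList num1).foldl (fun d i => d.modify i 0 (· + 1)) (pvD3 num1 num2 num3))))

def pvTwice (num1 num2 num3 : List Int) : PySem.Set Int :=
  PySem.Set.union (PySem.Set.union
    (PySem.Set.inter (PySem.Set.ofList num1) (PySem.Set.ofList num2))
    (PySem.Set.inter (PySem.Set.ofList num1) (PySem.Set.ofList num3)))
    (PySem.Set.inter (PySem.Set.ofList num2) (PySem.Set.ofList num3))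

def pvQ (num1 num2 num3 : List Int) (k : Int) : Bool :=
  decide (1 < (if k ∈ num1 then (1:Int) else 0) + (if k ∈ num2 then 1 else 0) + (if k ∈ num3 then 1 else 0))

theorem pv_keys3 (num1 num2 num3 : List Int) :
    (pvD3 num1 num2 num3).keys = PySem.Set.ofList (num1 ++ num2 ++ num3) := by
  unfold pvD3
  rw [PySem.Dict.keys_foldl_insert, PySem.Dict.keys_foldl_insert, PySem.Dict.keys_foldl_insert,
    PySem.Dict.keys_empty]
  exact pv_update_chain num1 num2 num3

theorem pv_keys6 (num1 num2 num3 : List Int) :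
    (pvD6 num1 num2 num3).keys = PySem.Set.ofList (num1 ++ num2 ++ num3) := by
  unfold pvD6
  rw [PySem.Dict.keys_foldl_modify, PySem.Dict.keys_foldl_modify, PySem.Dict.keys_foldl_modify,
    pv_keys3]
  rw [pv_update_of_subset (PySem.Set.ofList num1) _ (by
    intro x hx
    rw [PySem.Set.mem_ofList] at hx ⊢
    simp [hx])]
  rw [pv_update_of_subset (PySem.Set.ofList num2) _ (by
    intro x hx
    rw [PySem.Set.mem_ofList] at hx ⊢
    simp [hx])]
  rw [pv_update_of_subset (PySem.Set.ofList num3) _ (by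
    intro x hx
    rw [PySem.Set.mem_ofList] at hx ⊢
    simp [hx])]

theorem pv_val6 (num1 num2 num3 : List Int) (k : Int) :
    (pvD6 num1 num2 num3).getD k 0
      = (if k ∈ num1 then (1:Int) else 0) + (if k ∈ num2 then 1 else 0) + (if k ∈ num3 then 1 else 0) := by
  unfold pvD6
  rw [PySem.Dict.getD_foldl_modify_add_one, PySem.Dict.getD_foldl_modify_add_one,
    PySem.Dict.getD_foldl_modify_add_one]
  have hz : (pvD3 num1 num2 num3).getD k 0 = 0 := by
    unfold pvD3
    exact pv_getD_insert_zero _ _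
      (pv_getD_insert_zero _ _
        (pv_getD_insert_zero _ _ (fun k' => PySem.Dict.getD_empty k' 0))) k
  rw [hz, pv_count_ofList, pv_count_ofList, pv_count_ofList, zero_add]

theorem pv_A (num1 num2 num3 : List Int) :
    tot num1 num2 num3
      = (PySem.Set.ofList (num1 ++ num2 ++ num3)).filter (pvQ num1 num2 num3) := by
  have h0 : tot num1 num2 num3
      = (pvD6 num1 num2 num3).items.foldl (fun a kv => if kv.2 > 1 then a ++ [kv.1] else a) [] := rfl
  have hnd : (pvD6 num1 num2 num3).keys.Nodup := by
    rw [pv_keys6]; exact PySem.Set.nodup_ofList _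
  have hfun : (fun (a : List Int) (kv : Int × Int) => if kv.2 > 1 then a ++ [kv.1] else a)
      = (fun (a : List Int) (kv : Int × Int) =>
          if (fun (kv : Int × Int) => decide (1 < kv.2)) kv = true then a ++ [Prod.fst kv] else a) := by
    funext a kv
    by_cases h : 1 < kv.2 <;> simp [h]
  rw [h0, hfun, PySem.List.foldl_append_if, PySem.Dict.items_eq_map_keys _ hnd 0,
    List.filter_map, List.map_map, List.nil_append, pv_keys6,
    show (Prod.fst ∘ fun k => (k, (pvD6 num1 num2 num3).getD k 0)) = id from rfl, List.map_id]
  apply List.filter_congr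
  intro x _
  show decide (1 < (pvD6 num1 num2 num3).getD x 0) = pvQ num1 num2 num3 x
  rw [pv_val6]
  rfl

theorem pv_B (num1 num2 num3 : List Int) :
    tot_alt num1 num2 num3
      = (PySem.Set.ofList (num1 ++ num2 ++ num3)).filter
          (fun x => PySem.Set.contains (pvTwice num1 num2 num3) x) := by
  have h1 : tot_alt num1 num2 num3
      = pvFD (fun x => PySem.Set.contains (pvTwice num1 num2 num3) x) PySem.Set.empty
          (PySem.Set.ofList num1 ++ PySem.Set.ofList num2 ++ PySem.Set.ofList num3) :=
    pv_bloop _ _ [] _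
  have h2 := pv_fd_eq_dfilter (fun x => PySem.Set.contains (pvTwice num1 num2 num3) x)
    (PySem.Set.ofList num1 ++ PySem.Set.ofList num2 ++ PySem.Set.ofList num3) PySem.Set.empty []
    (fun _ _ => Iff.rfl)
  have h3 := pv_filter_update (fun x => PySem.Set.contains (pvTwice num1 num2 num3) x)
    (PySem.Set.ofList num1 ++ PySem.Set.ofList num2 ++ PySem.Set.ofList num3) []
  rw [PySem.Set.update_nil_left, List.filter_nil, List.nil_append] at h3
  rw [h1, h2, ← h3, pv_ofList_chain]

theorem pv_main (num1 num2 num3 : List Int) :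
    tot num1 num2 num3 = tot_alt num1 num2 num3 := by
  rw [pv_A, pv_B]
  apply List.filter_congr
  intro k _
  rw [Bool.eq_iff_iff]
  unfold pvQ pvTwice
  simp only [decide_eq_true_eq, PySem.Set.contains_iff, PySem.Set.mem_union, PySem.Set.mem_inter,
    PySem.Set.mem_ofList]
  by_cases h1 : k ∈ num1 <;> by_cases h2 : k ∈ num2 <;> by_cases h3 : k ∈ num3 <;>
    simp [h1, h2, h3]

-- ===== VERDICT (by name: the statement is the Claim_ definition above) =====
theorem tot_spec : Claim_equal_tot := by
  intro num1 num2 num3 _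
  exact pv_main num1 num2 num3
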